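-- pv_equiv track=rewrite | github.com/hong0002/Baekjoon | 기타/곱셈을 누가 이렇게 해 ㅋㅋ.py | wrong_mul
-- ===== SOURCE A (Python) =====
-- def wrong_mul(a: int, b: int) -> int:
--     sa = str(a)[::-1]  # 일의 자리부터
--     sb = str(b)[::-1]
--
--     la, lb = len(sa), len(sb)
--     m = min(la, lb)
--
--     parts = []
--     for i in range(m):
--         parts.append(str((ord(sa[i]) - 48) * (ord(sb[i]) - 48)))
--
--     if la > lb:
--         for i in range(m, la):
--             parts.append(sa[i])          # 남는 자리는 긴 수의 숫자 그대로
--     elif lb > la: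
--         for i in range(m, lb):
--             parts.append(sb[i])
--
--     # parts는 일의자리쪽부터 쌓였으니 뒤집어서 붙이면 최종 문자열
--     res_str = ''.join(reversed(parts))
--     return int(res_str)
-- ===== SOURCE B (Python) =====
-- def wrong_mul(a: int, b: int) -> int:
--     # MSB-first: split the longer string into a raw head and an equal-length low part,
--     # multiply aligned low digits pairwise, concatenate, parse.
--     sa, sb = str(a), str(b)
--     if len(sa) >= len(sb):
--         d = len(sa) - len(sb)
--         head, lo_a, lo_b = sa[:d], sa[d:], sb
--     else:
--         d = len(sb) - len(sa)
--         head, lo_a, lo_b = sb[:d], sa, sb[d:]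
--     body = ''.join(str((ord(x) - 48) * (ord(y) - 48)) for x, y in zip(lo_a, lo_b))
--     return int(head + body)
-- ===== Notes on version B (the rewrite author's own statement) =====
-- stated objective: alternative
-- what changed: B works most-significant-first with no string reversal: it splits the longer decimal string into a raw head and an equal-length low part, maps the digit-product over zip of the aligned low parts, and parses head+body, instead of A's reverse-both-strings, index-loop LSB-first, append leftovers, reverse-and-join construction.
import Mathlib
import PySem

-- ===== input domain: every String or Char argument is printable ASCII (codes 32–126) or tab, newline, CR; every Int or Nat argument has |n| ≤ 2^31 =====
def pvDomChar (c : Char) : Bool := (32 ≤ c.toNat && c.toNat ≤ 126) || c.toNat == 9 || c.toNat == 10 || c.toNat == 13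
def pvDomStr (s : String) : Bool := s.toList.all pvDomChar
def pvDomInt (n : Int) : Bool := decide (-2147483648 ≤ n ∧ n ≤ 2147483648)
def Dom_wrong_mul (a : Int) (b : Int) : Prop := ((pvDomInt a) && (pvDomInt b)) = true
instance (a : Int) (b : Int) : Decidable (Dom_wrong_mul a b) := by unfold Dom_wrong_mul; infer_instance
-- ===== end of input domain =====

-- B re-decomposes A most-significant-first (raw head slice + zipped digit products), removing both
-- string reversals; same cost, different construction (objective: alternative).

-- ===== PORT A =====
-- A, transliterated: reverse both decimal strings, loop LSB-first multiplying aligned digits,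
-- append the longer string's leftover characters raw, reverse the parts and join, then int().
-- str(x)[::-1] is reversal (PySem.Str.slice?_none_none_neg_one); ord(c) is (c.toNat : Int);
-- int(s) is PySem.Int.ofChars?, whose none (ValueError) case is excluded by Pre_wrong_mul
-- (the .getD 0 is never the result on Pre_); indices are in range, so pyGetD is exact.
def wrong_mul (a : Int) (b : Int) : Int :=
  let sa : List Char := (PySem.Int.toChars a).reverse
  let sb : List Char := (PySem.Int.toChars b).reverse
  let la : Int := sa.length
  let lb : Int := sb.length
  let m : Int := min la lb
  let parts : List (List Char) :=
    (PySem.List.pyRange 0 m 1).foldl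
      (fun acc i =>
        acc ++ [PySem.Int.toChars
          ((((PySem.List.pyGetD sa i ' ').toNat : Int) - 48) *
           (((PySem.List.pyGetD sb i ' ').toNat : Int) - 48))]) []
  let parts : List (List Char) :=
    if la > lb then
      (PySem.List.pyRange m la 1).foldl (fun acc i => acc ++ [[PySem.List.pyGetD sa i ' ']]) parts
    else if lb > la then
      (PySem.List.pyRange m lb 1).foldl (fun acc i => acc ++ [[PySem.List.pyGetD sb i ' ']]) parts
    else parts
  (PySem.Int.ofChars? (PySem.Chars.join [] parts.reverse)).getD 0

-- ===== PORT B =====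
-- B, transliterated: no reversal; split the longer string into raw head sa[:d] and low part sa[d:]
-- (PySem.List.slice), zip the equal-length low parts MSB-first, map the digit product, join,
-- parse head+body (same int() convention as above).
def wrong_mul_alt (a : Int) (b : Int) : Int :=
  let sa : List Char := PySem.Int.toChars a
  let sb : List Char := PySem.Int.toChars b
  let t : List Char × List Char × List Char :=
    if sa.length ≥ sb.length then
      let d : Int := (sa.length : Int) - (sb.length : Int)
      (PySem.List.slice sa none (some d), PySem.List.slice sa (some d) none, sb)
    else
      let d : Int := (sb.length : Int) - (sa.length : Int)
      (PySem.List.slice sb none (some d), sa, PySem.List.slice sb (some d) none)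
  let body : List Char :=
    PySem.Chars.join []
      ((t.2.1.zip t.2.2).map (fun xy =>
        PySem.Int.toChars (((xy.1.toNat : Int) - 48) * ((xy.2.toNat : Int) - 48))))
  (PySem.Int.ofChars? (t.1 ++ body)).getD 0

-- ===== PRECONDITION & SPEC =====
-- Pre_ excludes exactly the inputs where A's int() raises ValueError: the operands' decimal strings
-- have different lengths, the shorter operand is negative, and the longer's digit aligned with the
-- shorter's '-' sign is nonzero — then a negative digit product lands mid-string. A returns nowhere
-- outside Pre_, so no input on which A returns is excluded.
def Pre_wrong_mul (a : Int) (b : Int) : Prop :=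
  let ca := PySem.Int.toChars a
  let cb := PySem.Int.toChars b
  ¬ (ca.length ≠ cb.length ∧
     (if ca.length < cb.length then ca else cb).getD 0 ' ' = '-' ∧
     (if ca.length < cb.length then cb else ca).getD
        (max ca.length cb.length - min ca.length cb.length) ' ' ≠ '0')
instance (a : Int) (b : Int) : Decidable (Pre_wrong_mul a b) := by unfold Pre_wrong_mul; infer_instance
def pvWitness_wrong_mul : Int × Int := (34, 567)

def Spec_wrong_mul (a : Int) (b : Int) (out : Int) : Prop := out = wrong_mul_alt a b
instance (a : Int) (b : Int) (out : Int) : Decidable (Spec_wrong_mul a b out) := by unfold Spec_wrong_mul; infer_instance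

-- ===== CLAIM (what is proved, stated in full; the proofs are below) =====
def Claim_equal_wrong_mul : Prop := ∀ (a : Int) (b : Int), Dom_wrong_mul a b → Pre_wrong_mul a b → Spec_wrong_mul a b (wrong_mul a b)

-- ===== LEMMAS AND PROOFS =====

lemma join_nil_flatten (ps : List (List Char)) : PySem.Chars.join [] ps = ps.flatten := by
  induction ps with
  | nil => rfl
  | cons p ps ih =>
    cases ps with
    | nil => simp [PySem.Chars.join, List.intercalate]
    | cons q ps =>
      simp only [PySem.Chars.join, List.intercalate, List.intersperse] at ih ⊢
      simp_all

lemma zipWith_truncL (g : Char → Char → List Char) (u v : List Char) :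
    List.zipWith g u v = List.zipWith g (u.take v.length) v := by
  induction u generalizing v with
  | nil => simp
  | cons x u ih => cases v with
    | nil => simp
    | cons y v => simp [ih]

lemma range_min_zipWith (g : Char → Char → List Char) (u v : List Char) :
    (List.range (min u.length v.length)).map (fun i => g (u.getD i ' ') (v.getD i ' '))
      = List.zipWith g u v := by
  induction u generalizing v with
  | nil => simp
  | cons x u ih => cases v with
    | nil => simp
    | cons y v =>
      simp only [List.length_cons, Nat.succ_min_succ, List.range_succ_eq_map, List.map_cons,
        List.map_map, List.zipWith_cons_cons, Function.comp_def, List.getD_cons_zero,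
        List.getD_cons_succ]
      rw [ih v]

lemma zip_map_eq_zipWith (g : Char → Char → List Char) (u v : List Char) :
    (u.zip v).map (fun xy => g xy.1 xy.2) = List.zipWith g u v := by
  simp [List.zip, List.map_zipWith]

lemma zip_map_eq_zipWith_flip (g : Char → Char → List Char) (u v : List Char) :
    (u.zip v).map (fun xy => g xy.1 xy.2) = List.zipWith (fun x y => g y x) v u := by
  rw [zip_map_eq_zipWith]; exact List.zipWith_comm

-- A's parts pipeline (built LSB-first over the reverses, then reversed and joined) equals B's
-- head-plus-zipped-products string, for any digit-pair function g, when xs is the longer string.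
lemma core (g : Char → Char → List Char) (xs ys : List Char) (h : ys.length ≤ xs.length) :
    PySem.Chars.join []
      (((PySem.List.pyRange (min (xs.reverse.length : Int) (ys.reverse.length : Int)) (xs.reverse.length : Int) 1).foldl
          (fun acc i => acc ++ [[PySem.List.pyGetD xs.reverse i ' ']])
          ((PySem.List.pyRange 0 (min (xs.reverse.length : Int) (ys.reverse.length : Int)) 1).foldl
            (fun acc i => acc ++ [g (PySem.List.pyGetD xs.reverse i ' ') (PySem.List.pyGetD ys.reverse i ' ')]) [])).reverse)
    = xs.take (xs.length - ys.length)
      ++ PySem.Chars.join [] (List.zipWith g (xs.drop (xs.length - ys.length)) ys) := by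
  set u := xs.reverse with hu
  set v := ys.reverse with hv
  have hlen : (min (u.length : Int) (v.length : Int)) = ((min u.length v.length : Nat) : Int) := by
    push_cast; rfl
  have hmin : min u.length v.length = v.length := by
    simp [hu, hv]; omega
  rw [PySem.List.foldl_append_singleton_eq_map
        (fun i => g (PySem.List.pyGetD u i ' ') (PySem.List.pyGetD v i ' '))]
  rw [PySem.List.foldl_append_singleton_eq_map (fun i => [PySem.List.pyGetD u i ' '])]
  rw [hlen, PySem.List.pyRange_zero_nat, List.map_map]
  have h1 : List.map ((fun i => g (PySem.List.pyGetD u i ' ') (PySem.List.pyGetD v i ' ')) ∘ fun k : Nat => ((k : Int)))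
      (List.range (min u.length v.length)) = List.zipWith g u v := by
    rw [← range_min_zipWith g u v]
    apply List.map_congr_left
    intro i _
    simp [Function.comp, PySem.List.pyGetD_natCast]
  rw [h1]
  have h2 : (PySem.List.pyRange ((min u.length v.length : Nat) : Int) (u.length : Int) 1).map
      (fun i => [PySem.List.pyGetD u i ' ']) = (u.drop v.length).map (fun c => [c]) := by
    have := PySem.List.map_pyGetD_pyRange' u ' ' (a := ((min u.length v.length : Nat) : Int)) (by positivity)
    calc (PySem.List.pyRange ((min u.length v.length : Nat) : Int) (u.length : Int) 1).map
            (fun i => [PySem.List.pyGetD u i ' '])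
        = ((PySem.List.pyRange ((min u.length v.length : Nat) : Int) (u.length : Int) 1).map
            (fun i => PySem.List.pyGetD u i ' ')).map (fun c => [c]) := by rw [List.map_map]; rfl
      _ = (u.drop v.length).map (fun c => [c]) := by
            rw [this]; congr 1; rw [hmin]; simp
  rw [h2]
  rw [List.reverse_append, join_nil_flatten, List.flatten_append, ← join_nil_flatten, ← join_nil_flatten]
  congr 1
  · rw [← List.map_reverse, PySem.Chars.join_nil_singletons, hu, List.reverse_drop]
    simp [hv]
  · rw [zipWith_truncL g u v, List.nil_append]
    rw [List.reverse_zipWith (by simp [hu, hv]; omega)]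
    simp [hu, hv, List.reverse_take]

-- ===== VERDICT (by name: the statement is the Claim_ definition above) =====
theorem wrong_mul_spec : Claim_equal_wrong_mul := by
  intro a b _hd _hp
  simp only [Spec_wrong_mul, wrong_mul, wrong_mul_alt]
  set ca := PySem.Int.toChars a with hca
  set cb := PySem.Int.toChars b with hcb
  rcases lt_trichotomy ca.length cb.length with hlt | heq | hgt
  · -- cb longer: A takes second branch, B takes else branch
    rw [if_neg (show ¬ ((ca.reverse.length : Int) > (cb.reverse.length : Int)) by simp; omega)]
    rw [if_pos (show (cb.reverse.length : Int) > (ca.reverse.length : Int) by simp; omega)]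
    rw [if_neg (show ¬ (ca.length ≥ cb.length) by omega)]
    refine congrArg (fun s => (PySem.Int.ofChars? s).getD 0) ?_
    have hd : (0:Int) ≤ (cb.length : Int) - (ca.length : Int) := by omega
    have hcore := core (fun x y => PySem.Int.toChars (((y.toNat : Int) - 48) * ((x.toNat : Int) - 48))) cb ca (le_of_lt hlt)
    beta_reduce at hcore
    rw [min_comm ((ca.reverse.length : Int)) ((cb.reverse.length : Int)), hcore]
    rw [PySem.List.slice_to _ hd, PySem.List.slice_from _ hd]
    simp only [Int.toNat_sub]
    congr 1
    congr 1
    exact (zip_map_eq_zipWith_flip _ _ _).symm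
  · -- equal lengths: A keeps parts unchanged, B takes the ≥ branch with d = 0
    rw [if_neg (show ¬ ((ca.reverse.length : Int) > (cb.reverse.length : Int)) by simp; omega)]
    rw [if_neg (show ¬ ((cb.reverse.length : Int) > (ca.reverse.length : Int)) by simp; omega)]
    rw [if_pos (show ca.length ≥ cb.length by omega)]
    refine congrArg (fun s => (PySem.Int.ofChars? s).getD 0) ?_
    have hcore := core (fun x y => PySem.Int.toChars (((x.toNat : Int) - 48) * ((y.toNat : Int) - 48))) ca cb (le_of_eq heq.symm)
    rw [show PySem.List.pyRange (min ((ca.reverse.length : Int)) ((cb.reverse.length : Int))) ((ca.reverse.length : Int)) 1 = []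
          from PySem.List.pyRange_one_eq_nil (by simp; omega), List.foldl_nil] at hcore
    rw [hcore]
    have hd : (0:Int) ≤ (ca.length : Int) - (cb.length : Int) := by omega
    rw [PySem.List.slice_to _ hd, PySem.List.slice_from _ hd]
    simp only [Int.toNat_sub]
    congr 1
    congr 1
    exact (zip_map_eq_zipWith _ _ _).symm
  · -- ca longer: A takes first branch, B takes ≥ branch
    have hA : ((ca.reverse.length : Int) > (cb.reverse.length : Int)) := by simp; omega
    rw [if_pos (by simpa using hA)]
    rw [if_pos (show ca.length ≥ cb.length by omega)]
    refine congrArg (fun s => (PySem.Int.ofChars? s).getD 0) ?_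
    have hd : (0:Int) ≤ (ca.length : Int) - (cb.length : Int) := by omega
    rw [core (fun x y => PySem.Int.toChars (((x.toNat : Int) - 48) * ((y.toNat : Int) - 48))) ca cb (le_of_lt hgt)]
    rw [PySem.List.slice_to _ hd, PySem.List.slice_from _ hd]
    simp only [Int.toNat_sub]
    congr 1
    congr 1
    exact (zip_map_eq_zipWith _ _ _).symm
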